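-- pv_equiv track=rewrite | github.com/bholagabbar/algorithmic-programming | Code/WorkspaceB/Python Scripts/SUMPAIR.py | MergeAndCntInv
-- ===== SOURCE A (Python) =====
-- def MergeAndCntInv(l,r,a,D):
-- 	i=j=k=cnt=0
-- 	ll,rl,al=len(l),len(r),len(a)
-- 	while i<ll or j<rl:
-- 		if i==ll:
-- 			a[k]=r[j]
-- 			j+=1
--
-- 		elif j==rl:
-- 			a[k]=l[i]
-- 			i+=1
--
-- 		elif l[i]<=r[j]:
-- 			if(l[i]-r[j]<D):
-- 				cnt+=l[i]
-- 				cnt+=r[j]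
-- 			a[k]=l[i]
-- 			i+=1
--
-- 		else:
-- 			a[k]=r[j]
-- 			j+=1
-- 		k+=1
--
-- 	return cnt
-- ===== SOURCE B (Python) =====
-- # Split decomposition: cnt only depends on positions where BOTH lists are still in
-- # range, so compute it first with a dedicated two-pointer loop (no writes), then do
-- # the merge into `a` in a separate, simpler loop.
-- def MergeAndCntInv(l, r, a, D):
--     ll, rl = len(l), len(r)
--     # phase 1: the conditional pair sum, two pointers, stops at first exhaustion
--     cnt = 0
--     i = j = 0
--     while i < ll and j < rl:
--         if l[i] <= r[j]:
--             if l[i] - r[j] < D: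
--                 cnt += l[i] + r[j]
--             i += 1
--         else:
--             j += 1
--     # phase 2: the merge into a, element-wise writes in merged order
--     i = j = k = 0
--     while i < ll or j < rl:
--         if i < ll and (j == rl or l[i] <= r[j]):
--             a[k] = l[i]
--             i += 1
--         else:
--             a[k] = r[j]
--             j += 1
--         k += 1
--     return cnt
-- ===== Notes on version B (the rewrite author's own statement) =====
-- stated objective: alternative
-- what changed: B splits A's single fused merge-and-count loop into two differently shaped passes: a two-pointer loop over both lists (no array writes, stops as soon as either list is exhausted) that computes cnt alone, then a separate 2-branch merge loop that fills `a`; cnt never changes once a list is exhausted, which the proof establishes.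
import Mathlib
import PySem

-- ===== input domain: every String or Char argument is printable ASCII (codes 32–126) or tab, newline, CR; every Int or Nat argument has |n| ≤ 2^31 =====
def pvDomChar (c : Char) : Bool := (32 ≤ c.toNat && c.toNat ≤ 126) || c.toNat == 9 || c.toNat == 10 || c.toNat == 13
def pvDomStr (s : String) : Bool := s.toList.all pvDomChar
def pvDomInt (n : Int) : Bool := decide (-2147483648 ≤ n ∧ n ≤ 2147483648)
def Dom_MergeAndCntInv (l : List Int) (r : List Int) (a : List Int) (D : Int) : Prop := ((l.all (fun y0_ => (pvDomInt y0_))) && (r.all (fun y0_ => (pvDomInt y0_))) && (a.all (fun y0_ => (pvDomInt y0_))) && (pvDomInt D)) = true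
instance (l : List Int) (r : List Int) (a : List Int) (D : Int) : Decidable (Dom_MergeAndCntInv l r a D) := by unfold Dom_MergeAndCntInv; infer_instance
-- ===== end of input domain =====

-- B splits A's fused loop: cnt from a dedicated two-pointer loop, then the merge
-- writes into `a` in a separate loop (B performs the same mutation of `a` as A;
-- the equivalence proved is about the return value).


-- ===== PORT A =====
-- A's while loop: state (i, j, k, cnt, a); a[k] = x is List.set (in range under Pre_);
-- i == ll / j == rl are transliterated as l.length ≤ i / r.length ≤ j (equivalent: the
-- counters only ever step past the length by exactly reaching it).
def MergeAndCntInvLoop (l : List Int) (r : List Int) (D : Int) :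
    Nat → Nat → Nat → Int → List Int → Int
  | i, j, k, cnt, a =>
    if h : i < l.length ∨ j < r.length then
      if hi : l.length ≤ i then
        MergeAndCntInvLoop l r D i (j + 1) (k + 1) cnt (a.set k (r.getD j 0))
      else if hj : r.length ≤ j then
        MergeAndCntInvLoop l r D (i + 1) j (k + 1) cnt (a.set k (l.getD i 0))
      else if l.getD i 0 ≤ r.getD j 0 then
        MergeAndCntInvLoop l r D (i + 1) j (k + 1)
          (if l.getD i 0 - r.getD j 0 < D then cnt + l.getD i 0 + r.getD j 0 else cnt)
          (a.set k (l.getD i 0))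
      else
        MergeAndCntInvLoop l r D i (j + 1) (k + 1) cnt (a.set k (r.getD j 0))
    else cnt
  termination_by i j _ _ _ => (l.length - i) + (r.length - j)
  decreasing_by all_goals omega

def MergeAndCntInv (l : List Int) (r : List Int) (a : List Int) (D : Int) : Int :=
  MergeAndCntInvLoop l r D 0 0 0 0 a

-- ===== PORT B =====
-- B phase 1: two-pointer cnt loop, state (i, j, cnt); no writes, stops at first exhaustion.
def MergeAndCntInvAltLoop (l : List Int) (r : List Int) (D : Int) :
    Nat → Nat → Int → Int
  | i, j, cnt =>
    if h : i < l.length ∧ j < r.length then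
      if l.getD i 0 ≤ r.getD j 0 then
        MergeAndCntInvAltLoop l r D (i + 1) j
          (if l.getD i 0 - r.getD j 0 < D then cnt + (l.getD i 0 + r.getD j 0) else cnt)
      else
        MergeAndCntInvAltLoop l r D i (j + 1) cnt
    else cnt
  termination_by i j _ => (l.length - i) + (r.length - j)
  decreasing_by all_goals omega

-- B phase 2: the merge loop writing a[k] in merged order (mutates `a` in Python;
-- j == rl is transliterated as r.length ≤ j, equivalent on the reachable states).
def MergeAndCntInvFill (l : List Int) (r : List Int) :
    Nat → Nat → Nat → List Int → List Int
  | i, j, k, a =>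
    if h : i < l.length ∨ j < r.length then
      if hc : i < l.length ∧ (r.length ≤ j ∨ l.getD i 0 ≤ r.getD j 0) then
        MergeAndCntInvFill l r (i + 1) j (k + 1) (a.set k (l.getD i 0))
      else
        MergeAndCntInvFill l r i (j + 1) (k + 1) (a.set k (r.getD j 0))
    else a
  termination_by i j _ _ => (l.length - i) + (r.length - j)
  decreasing_by all_goals omega

def MergeAndCntInv_alt (l : List Int) (r : List Int) (a : List Int) (D : Int) : Int :=
  let cnt := MergeAndCntInvAltLoop l r D 0 0 0
  let _a := MergeAndCntInvFill l r 0 0 0 a  -- B's phase-2 mutation of `a`; no effect on the return value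
  cnt

-- ===== PRECONDITION & SPEC =====
-- Pre_ excludes exactly the inputs where A raises IndexError: the merge writes
-- len(l)+len(r) slots of `a`, so A raises iff len(a) < len(l)+len(r).
def Pre_MergeAndCntInv (l : List Int) (r : List Int) (a : List Int) (D : Int) : Prop :=
  l.length + r.length ≤ a.length
instance (l : List Int) (r : List Int) (a : List Int) (D : Int) : Decidable (Pre_MergeAndCntInv l r a D) := by unfold Pre_MergeAndCntInv; infer_instance

def pvWitness_MergeAndCntInv : List Int × List Int × List Int × Int :=
  ([1, 3], [2, 4], [0, 0, 0, 0], 2)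

def Spec_MergeAndCntInv (l : List Int) (r : List Int) (a : List Int) (D : Int) (out : Int) : Prop := out = MergeAndCntInv_alt l r a D
instance (l : List Int) (r : List Int) (a : List Int) (D : Int) (out : Int) : Decidable (Spec_MergeAndCntInv l r a D out) := by unfold Spec_MergeAndCntInv; infer_instance

-- ===== CLAIM (what is proved, stated in full; the proofs are below) =====
def Claim_equal_MergeAndCntInv : Prop := ∀ (l : List Int) (r : List Int) (a : List Int) (D : Int), Dom_MergeAndCntInv l r a D → Pre_MergeAndCntInv l r a D → Spec_MergeAndCntInv l r a D (MergeAndCntInv l r a D)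

-- ===== LEMMAS AND PROOFS =====

-- B's loop returns cnt immediately once either pointer is at the end.
theorem altLoop_out (l r : List Int) (D : Int) (i j : Nat) (cnt : Int)
    (h : ¬ (i < l.length ∧ j < r.length)) :
    MergeAndCntInvAltLoop l r D i j cnt = cnt := by
  rw [MergeAndCntInvAltLoop]; simp [h]

-- A's loop equals B's loop from every state: cnt is never changed in A's tail phases,
-- and while both pointers are in range the two loops take the same branch.
theorem loop_eq (l r : List Int) (D : Int) :
    ∀ (i j k : Nat) (cnt : Int) (a : List Int),
      MergeAndCntInvLoop l r D i j k cnt a = MergeAndCntInvAltLoop l r D i j cnt := by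
  intro i j k cnt a
  fun_induction MergeAndCntInvLoop l r D i j k cnt a with
  | case1 i j k cnt a h hi ih =>
      rw [ih, altLoop_out _ _ _ _ _ _ (by omega), altLoop_out _ _ _ _ _ _ (by omega)]
  | case2 i j k cnt a h hi hj ih =>
      rw [ih, altLoop_out _ _ _ _ _ _ (by omega), altLoop_out _ _ _ _ _ _ (by omega)]
  | case3 i j k cnt a h hi hj hle ih =>
      simp only [dite_eq_ite] at ih
      rw [ih]
      conv_rhs => rw [MergeAndCntInvAltLoop]
      rw [dif_pos (show i < l.length ∧ j < r.length by omega), if_pos hle]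
      congr 1
      split <;> ring
  | case4 i j k cnt a h hi hj hgt ih =>
      rw [ih]
      conv_rhs => rw [MergeAndCntInvAltLoop]
      rw [dif_pos (show i < l.length ∧ j < r.length by omega), if_neg hgt]
  | case5 i j k cnt a h =>
      rw [altLoop_out _ _ _ _ _ _ (by omega)]

-- ===== VERDICT (by name: the statement is the Claim_ definition above) =====
theorem MergeAndCntInv_spec : Claim_equal_MergeAndCntInv := by
  intro l r a D _ _
  unfold Spec_MergeAndCntInv MergeAndCntInv MergeAndCntInv_alt
  exact loop_eq l r D 0 0 0 0 a
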